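-- pv_equiv track=rewrite | github.com/AlexSyrtsov1/Mathematical-basics-of-cyber-security-02.04.02 | lab5/lab5.py | find_jacobian
-- ===== SOURCE A (Python) =====
-- def find_jacobian(a, n):
--     if (a == 0):
--         return 0
--     ans = 1
--     if (a < 0):
--         a = -a
--         if (n % 4 == 3):
--             ans = -ans
--     if (a == 1):
--         return ans
--     while(a):
--         if (a < 0):
--             a = -a
--             if (n % 4 == 3):
--                 ans = -ans
--         while (a % 2 == 0):
--             a = a // 2
--             if (n % 8 == 3 or n % 8 == 5):
--                 ans = -ans
--         a, n = n, a
--         if (a % 4 == 3 and n % 4 == 3):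
--             ans = -ans
--         a = a % n
--         if (a > n // 2):
--             a = a - n
--     if (n == 1):
--         return ans
--     return 0
-- ===== SOURCE B (Python) =====
-- def find_jacobian(a, n):
--     # Flat tail recursion with a sign accumulator: one case analysis per step
--     # (zero / negative / even / odd-reciprocity) instead of A's nested while loops.
--     def go(a, n, s):
--         if a == 0:
--             return s if n == 1 else 0
--         if a < 0:
--             return go(-a, n, -s if n % 4 == 3 else s)
--         if a % 2 == 0:
--             return go(a // 2, n, -s if n % 8 in (3, 5) else s)
--         if a % 4 == 3 and n % 4 == 3:
--             s = -s
--         r = n % a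
--         if r > a // 2:
--             r -= a
--         return go(r, a, s)
--     return 0 if a == 0 else go(a, n, 1)
-- ===== Notes on version B (the rewrite author's own statement) =====
-- stated objective: simpler
-- what changed: Replaces A's nested while-loops (outer Euclid-like loop with an inner factor-of-2 stripping loop and mutable state) by a single flat tail-recursive helper with a sign accumulator that handles zero / negative / even / odd as one case analysis per step.
import Mathlib
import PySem

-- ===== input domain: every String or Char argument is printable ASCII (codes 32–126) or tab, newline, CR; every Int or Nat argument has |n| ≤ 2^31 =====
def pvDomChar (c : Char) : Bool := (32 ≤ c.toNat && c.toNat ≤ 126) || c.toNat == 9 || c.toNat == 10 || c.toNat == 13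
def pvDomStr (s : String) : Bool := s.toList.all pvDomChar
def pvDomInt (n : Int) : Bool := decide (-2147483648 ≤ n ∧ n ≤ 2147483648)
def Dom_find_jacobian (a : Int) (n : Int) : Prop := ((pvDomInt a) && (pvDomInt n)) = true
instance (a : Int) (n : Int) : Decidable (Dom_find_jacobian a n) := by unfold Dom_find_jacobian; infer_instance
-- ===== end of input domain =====

-- B replaces A's nested while-loops by one flat tail recursion with a sign accumulator
-- (objective: simpler); same return value on every input, both programs are total.

-- ===== PORT A =====
-- termination measures (named so the recursive definitions carry only small proof terms)
theorem pvStripA_dec (a : Int) (h : PySem.Int.mod a 2 = 0 ∧ 0 < a) :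
    (PySem.Int.floordiv a 2).natAbs < a.natAbs := by
  rw [PySem.Int.floordiv_eq_ediv_of_pos (by omega : (0:Int) < 2)]
  omega

-- inner 'while a % 2 == 0' of A; the '0 < a' conjunct only makes the recursion total in Lean:
-- the loop is only ever entered with 0 < a (Python would diverge on a = 0, which is unreachable).
def pvStripA (a : Int) (n : Int) (ans : Int) : Int × Int :=
  if PySem.Int.mod a 2 = 0 ∧ 0 < a then
    pvStripA (PySem.Int.floordiv a 2) n
      (if PySem.Int.mod n 8 = 3 ∨ PySem.Int.mod n 8 = 5 then -ans else ans)
  else (a, ans)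
termination_by a.natAbs
decreasing_by exact pvStripA_dec a (by assumption)

lemma pvStripA_bounds (a n ans : Int) (ha : 0 < a) :
    0 < (pvStripA a n ans).1 ∧ (pvStripA a n ans).1 ≤ a := by
  revert ha
  fun_induction pvStripA a n ans with
  | case1 a ans h ih =>
      intro ha
      simp only [dite_eq_ite] at ih
      have hfd : PySem.Int.floordiv a 2 = a / 2 :=
        PySem.Int.floordiv_eq_ediv_of_pos (by omega)
      have hmod : PySem.Int.mod a 2 = a % 2 :=
        PySem.Int.mod_eq_emod_of_pos (by omega)
      obtain ⟨hm, -⟩ := h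
      rw [hmod] at hm
      obtain ⟨i1, i2⟩ := ih (by rw [hfd]; omega)
      rw [hfd] at i2
      exact ⟨i1, by omega⟩
  | case2 a ans h =>
      intro ha
      exact ⟨ha, le_refl a⟩

-- one iteration of A's outer while-loop: (new a, new n, new ans)
-- (the swap 'a, n = n, a' is inlined: p2.1 is the stripped a, n stays n)
def pvLoopStep (a : Int) (n : Int) (ans : Int) : Int × Int × Int :=
  let a1 := if a < 0 then -a else a
  let ans1 := if a < 0 ∧ PySem.Int.mod n 4 = 3 then -ans else ans
  let p2 := pvStripA a1 n ans1
  let ans2 := if PySem.Int.mod n 4 = 3 ∧ PySem.Int.mod p2.1 4 = 3 then -p2.2 else p2.2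
  let a3 := PySem.Int.mod n p2.1
  let a4 := if a3 > PySem.Int.floordiv p2.1 2 then a3 - p2.1 else a3
  (a4, p2.1, ans2)

theorem pvLoopStep_dec (a n ans : Int) (h0 : ¬ a = 0) :
    ((pvLoopStep a n ans).1).natAbs < a.natAbs := by
  dsimp only [pvLoopStep]
  have ha1 : 0 < (if a < 0 then -a else a) := by split <;> omega
  obtain ⟨hpos, hle⟩ := pvStripA_bounds (if a < 0 then -a else a) n
    (if a < 0 ∧ PySem.Int.mod n 4 = 3 then -ans else ans) ha1
  set q := (pvStripA (if a < 0 then -a else a) n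
    (if a < 0 ∧ PySem.Int.mod n 4 = 3 then -ans else ans)).1 with hq
  have hnn := PySem.Int.mod_nonneg n hpos
  have hlt := PySem.Int.mod_lt n hpos
  rw [PySem.Int.mod_eq_emod_of_pos hpos] at hnn hlt ⊢
  rw [PySem.Int.floordiv_eq_ediv_of_pos (by omega : (0:Int) < 2)]
  have habs : (if a < 0 then -a else a) = (a.natAbs : Int) := by split <;> omega
  rw [habs] at hle
  split_ifs <;> omega

-- outer 'while(a)' of A
def pvLoopA (a : Int) (n : Int) (ans : Int) : Int :=
  if a = 0 then (if n = 1 then ans else 0)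
  else pvLoopA (pvLoopStep a n ans).1 (pvLoopStep a n ans).2.1 (pvLoopStep a n ans).2.2
termination_by a.natAbs
decreasing_by exact pvLoopStep_dec a n ans (by assumption)

def find_jacobian (a : Int) (n : Int) : Int :=
  if a = 0 then 0
  else
    let ans : Int := 1
    let p := if a < 0 then ((-a), (if PySem.Int.mod n 4 = 3 then -ans else ans)) else (a, ans)
    if p.1 = 1 then p.2 else pvLoopA p.1 n p.2

-- ===== PORT B =====
theorem pvGoB_dec1 (a : Int) (h1 : a < 0) :
    2 * (-a).natAbs + (if -a < 0 then 1 else 0) < 2 * a.natAbs + (if a < 0 then 1 else 0) := by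
  split_ifs <;> omega

theorem pvGoB_dec2 (a : Int) (_h0 : ¬ a = 0) (h1 : ¬ a < 0) :
    2 * (PySem.Int.floordiv a 2).natAbs + (if PySem.Int.floordiv a 2 < 0 then 1 else 0) <
      2 * a.natAbs + (if a < 0 then 1 else 0) := by
  rw [PySem.Int.floordiv_eq_ediv_of_pos (by omega : (0:Int) < 2)]
  split_ifs <;> omega

theorem pvGoB_dec3 (a n : Int) (h0 : ¬ a = 0) (h1 : ¬ a < 0) :
    2 * (if PySem.Int.mod n a > PySem.Int.floordiv a 2
          then PySem.Int.mod n a - a else PySem.Int.mod n a).natAbs +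
        (if (if PySem.Int.mod n a > PySem.Int.floordiv a 2
          then PySem.Int.mod n a - a else PySem.Int.mod n a) < 0 then 1 else 0) <
      2 * a.natAbs + (if a < 0 then 1 else 0) := by
  have hpos : 0 < a := by omega
  have hnn := PySem.Int.mod_nonneg n hpos
  have hlt := PySem.Int.mod_lt n hpos
  rw [PySem.Int.mod_eq_emod_of_pos hpos] at hnn hlt ⊢
  rw [PySem.Int.floordiv_eq_ediv_of_pos (by omega : (0:Int) < 2)]
  split_ifs <;> omega

def pvGoB (a : Int) (n : Int) (s : Int) : Int :=
  if a = 0 then (if n = 1 then s else 0)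
  else if a < 0 then
    pvGoB (-a) n (if PySem.Int.mod n 4 = 3 then -s else s)
  else if PySem.Int.mod a 2 = 0 then
    pvGoB (PySem.Int.floordiv a 2) n
      (if PySem.Int.mod n 8 = 3 ∨ PySem.Int.mod n 8 = 5 then -s else s)
  else
    let s2 := if PySem.Int.mod a 4 = 3 ∧ PySem.Int.mod n 4 = 3 then -s else s
    let r := PySem.Int.mod n a
    let r2 := if r > PySem.Int.floordiv a 2 then r - a else r
    pvGoB r2 a s2
termination_by 2 * a.natAbs + (if a < 0 then 1 else 0)
decreasing_by
  · exact pvGoB_dec1 a (by assumption)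
  · exact pvGoB_dec2 a (by assumption) (by assumption)
  · exact pvGoB_dec3 a n (by assumption) (by assumption)

def find_jacobian_alt (a : Int) (n : Int) : Int :=
  if a = 0 then 0 else pvGoB a n 1

-- ===== PRECONDITION & SPEC =====
def Spec_find_jacobian (a : Int) (n : Int) (out : Int) : Prop := out = find_jacobian_alt a n
instance (a : Int) (n : Int) (out : Int) : Decidable (Spec_find_jacobian a n out) := by unfold Spec_find_jacobian; infer_instance

-- ===== CLAIM (what is proved, stated in full; the proofs are below) =====
def Claim_equal_find_jacobian : Prop := ∀ (a : Int) (n : Int), Dom_find_jacobian a n → Spec_find_jacobian a n (find_jacobian a n)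

-- ===== LEMMAS AND PROOFS =====

lemma pvLoopA_step (a n s : Int) (h0 : ¬ a = 0) :
    pvLoopA a n s = pvLoopA (pvLoopStep a n s).1 (pvLoopStep a n s).2.1 (pvLoopStep a n s).2.2 := by
  conv_lhs => rw [pvLoopA]
  rw [if_neg h0]

lemma pvLoopStep_neg (a n s : Int) (hneg : a < 0) :
    pvLoopStep a n s = pvLoopStep (-a) n (if PySem.Int.mod n 4 = 3 then -s else s) := by
  dsimp only [pvLoopStep]
  have h1 : ¬ (-a < 0) := by omega
  have h2 : ¬ 0 < a := by omega
  simp [hneg, h2]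

lemma pvLoopStep_even (a n s : Int) (hpos : 0 < a) (hev : PySem.Int.mod a 2 = 0) :
    pvLoopStep a n s = pvLoopStep (PySem.Int.floordiv a 2) n
      (if PySem.Int.mod n 8 = 3 ∨ PySem.Int.mod n 8 = 5 then -s else s) := by
  have hmod : PySem.Int.mod a 2 = a % 2 := PySem.Int.mod_eq_emod_of_pos (by omega)
  have hfd : PySem.Int.floordiv a 2 = a / 2 := PySem.Int.floordiv_eq_ediv_of_pos (by omega)
  have hstep : pvStripA a n s = pvStripA (PySem.Int.floordiv a 2) n
      (if PySem.Int.mod n 8 = 3 ∨ PySem.Int.mod n 8 = 5 then -s else s) := by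
    conv_lhs => rw [pvStripA]
    rw [if_pos ⟨hev, hpos⟩]
  have h1 : ¬ a < 0 := by omega
  have h1'' : ¬ ((a / 2) < 0) := by omega
  dsimp only [pvLoopStep]
  simp [h1, h1'', hstep]

lemma pvLoopStep_odd (a n s : Int) (hpos : 0 < a) (hev : ¬ PySem.Int.mod a 2 = 0) :
    pvLoopStep a n s =
      (if PySem.Int.mod n a > PySem.Int.floordiv a 2
          then PySem.Int.mod n a - a else PySem.Int.mod n a, a,
        if PySem.Int.mod n 4 = 3 ∧ PySem.Int.mod a 4 = 3 then -s else s) := by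
  have hstrip : pvStripA a n s = (a, s) := by
    conv_lhs => rw [pvStripA]
    exact if_neg (fun h => hev h.1)
  have h1 : ¬ a < 0 := by omega
  dsimp only [pvLoopStep]
  simp [h1, hstrip]

lemma pvLoopA_neg (a n s : Int) (hneg : a < 0) :
    pvLoopA a n s = pvLoopA (-a) n (if PySem.Int.mod n 4 = 3 then -s else s) := by
  rw [pvLoopA_step a n s (by omega), pvLoopStep_neg a n s hneg,
    ← pvLoopA_step (-a) n (if PySem.Int.mod n 4 = 3 then -s else s) (by omega)]

lemma pvLoopA_eq_pvGoB (a n s : Int) : pvLoopA a n s = pvGoB a n s := by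
  suffices h : ∀ (m : Nat) (a n s : Int),
      2 * a.natAbs + (if a < 0 then 1 else 0) ≤ m → pvLoopA a n s = pvGoB a n s from
    h _ a n s le_rfl
  intro m
  induction m with
  | zero =>
      intro a n s hle
      have h0 : a = 0 := by split_ifs at hle <;> omega
      subst h0
      rw [pvLoopA, pvGoB]
      simp
  | succ m ih =>
      intro a n s hle
      by_cases h0 : a = 0
      · subst h0
        rw [pvLoopA, pvGoB]
        simp
      by_cases hneg : a < 0
      · rw [pvLoopA_neg a n s hneg,
          ih (-a) n (if PySem.Int.mod n 4 = 3 then -s else s)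
            (by split_ifs at hle ⊢ <;> omega)]
        conv_rhs => rw [pvGoB]
        rw [if_neg h0, if_pos hneg]
      have hpos : 0 < a := by omega
      by_cases hev : PySem.Int.mod a 2 = 0
      · have hmod : PySem.Int.mod a 2 = a % 2 := PySem.Int.mod_eq_emod_of_pos (by omega)
        have hfd : PySem.Int.floordiv a 2 = a / 2 := PySem.Int.floordiv_eq_ediv_of_pos (by omega)
        rw [pvLoopA_step a n s h0, pvLoopStep_even a n s hpos hev,
          ← pvLoopA_step (PySem.Int.floordiv a 2) n
            (if PySem.Int.mod n 8 = 3 ∨ PySem.Int.mod n 8 = 5 then -s else s)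
            (by rw [hmod] at hev; rw [hfd]; omega),
          ih (PySem.Int.floordiv a 2) n (if PySem.Int.mod n 8 = 3 ∨ PySem.Int.mod n 8 = 5 then -s else s)
            (by
              rw [hmod] at hev
              rw [hfd]
              split_ifs at hle ⊢ <;> omega)]
        conv_rhs => rw [pvGoB]
        rw [if_neg h0, if_neg hneg, if_pos hev]
      · -- odd positive: the reciprocity step
        have hnn := PySem.Int.mod_nonneg n hpos
        have hlt := PySem.Int.mod_lt n hpos
        rw [pvLoopA_step a n s h0, pvLoopStep_odd a n s hpos hev]
        dsimp only
        rw [ih (if PySem.Int.mod n a > PySem.Int.floordiv a 2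
                then PySem.Int.mod n a - a else PySem.Int.mod n a) a
              (if PySem.Int.mod n 4 = 3 ∧ PySem.Int.mod a 4 = 3 then -s else s)
            (by
              rw [PySem.Int.mod_eq_emod_of_pos hpos] at hnn hlt ⊢
              rw [PySem.Int.floordiv_eq_ediv_of_pos (by omega : (0:Int) < 2)]
              split_ifs at hle ⊢ <;> omega)]
        conv_rhs => rw [pvGoB]
        rw [if_neg h0, if_neg hneg, if_neg hev]
        exact congrArg _ (if_congr and_comm rfl rfl)

-- the loop on a = 1 finishes in one pass with n = 1, returning the sign unchanged
lemma pvLoopA_one (n s : Int) : pvLoopA 1 n s = s := by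
  have hmod1 : PySem.Int.mod n 1 = 0 := by
    rw [PySem.Int.mod_eq_emod_of_pos (by omega : (0:Int) < 1)]
    exact Int.emod_one n
  have d1 : PySem.Int.mod (1:Int) 4 = 1 := by decide
  have d2 : PySem.Int.floordiv (1:Int) 2 = 0 := by decide
  have hodd : ¬ PySem.Int.mod (1:Int) 2 = 0 := by decide
  rw [pvLoopA_step 1 n s (by omega), pvLoopStep_odd 1 n s (by omega) hodd]
  norm_num [hmod1, d1, d2]
  rw [pvLoopA]
  simp

lemma find_jacobian_eq_loop (a n : Int) (h0 : a ≠ 0) : find_jacobian a n = pvLoopA a n 1 := by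
  unfold find_jacobian
  rw [if_neg h0]
  by_cases hneg : a < 0
  · rw [pvLoopA_neg a n 1 hneg]
    simp only [hneg, if_true]
    by_cases h1 : -a = 1
    · rw [if_pos h1, h1, pvLoopA_one]
    · rw [if_neg h1]
  · simp only [hneg, if_false]
    by_cases h1 : a = 1
    · rw [if_pos h1, h1, pvLoopA_one]
    · rw [if_neg h1]

-- ===== VERDICT (by name: the statement is the Claim_ definition above) =====
theorem find_jacobian_spec : Claim_equal_find_jacobian := by
  intro a n _
  unfold Spec_find_jacobian find_jacobian_alt
  by_cases h0 : a = 0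
  · subst h0
    simp [find_jacobian]
  · rw [if_neg h0, find_jacobian_eq_loop a n h0, pvLoopA_eq_pvGoB]
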